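-- pv_equiv track=rewrite | github.com/EvilJagaGenius/MalkharMk1 | Code/bresenham.py | getLine2D
-- ===== SOURCE A (Python) =====
-- def getLine2D(start, end):
--     #Setup initial conditions
--     x1 = start[0]
--     y1 = start[1]
--     x2 = end[0]
--     y2 = end[1]
--     dx = x2 - x1
--     dy = y2 - y1
--
--     #Determine how steep the line is
--     is_steep = abs(dy) > abs(dx)
--
--     #Rotate line
--     if is_steep:
--         x1, y1 = y1, x1
--         x2, y2 = y2, x2
--
--     #Swap start and end points if necessary and store swap state
--     swapped = False
--     if x1 > x2:
--         x1, x2 = x2, x1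
--         y1, y2 = y2, y1
--         swapped = True
--
--     #Recalculate differentials
--     dx = x2 - x1
--     dy = y2 - y1
--
--     #Calculate error
--     error = int(dx / 2.0)
--     if y1 < y2:
--         ystep = 1
--     else:
--         ystep = -1
--
--     #Iterate over bounding box generating points between start and end
--     y = y1
--     points = []
--     for x in range(x1, x2 + 1):
--         if is_steep:
--             coord = [y, x]
--         else:
--             coord = [x, y]
--         points.append(coord)
--         error -= abs(dy)
--         if error < 0:
--             y += ystep
--             error += dx
--
--     #Reverse the list if the coordinates were swapped
--     if swapped:
--         points.reverse()
--     return points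
-- ===== SOURCE B (Python) =====
-- def getLine2D(start, end):
--     # Same setup as the classic algorithm, but each y is computed in closed form
--     x1, y1 = start[0], start[1]
--     x2, y2 = end[0], end[1]
--     is_steep = abs(y2 - y1) > abs(x2 - x1)
--     if is_steep:
--         x1, y1 = y1, x1
--         x2, y2 = y2, x2
--     swapped = x1 > x2
--     if swapped:
--         x1, x2 = x2, x1
--         y1, y2 = y2, y1
--     dx = x2 - x1
--     ady = abs(y2 - y1)
--     ystep = 1 if y1 < y2 else -1
--     if dx == 0:
--         pts = [[y1, x1] if is_steep else [x1, y1]]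
--     else:
--         half = dx // 2
--         pts = []
--         for i in range(dx + 1):
--             k = -(-(i * ady - half) // dx)
--             if k < 0:
--                 k = 0
--             y = y1 + ystep * k
--             x = x1 + i
--             pts.append([y, x] if is_steep else [x, y])
--     return pts[::-1] if swapped else pts
-- ===== Notes on version B (the rewrite author's own statement) =====
-- stated objective: alternative
-- what changed: Replaces the stateful Bresenham error-accumulator loop (error/y carried across iterations) by a per-index closed form: y at step i is y1 + ystep*max(0, ceil((i*|dy| - dx//2)/dx)), with a dx==0 single-point case.
import Mathlib
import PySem

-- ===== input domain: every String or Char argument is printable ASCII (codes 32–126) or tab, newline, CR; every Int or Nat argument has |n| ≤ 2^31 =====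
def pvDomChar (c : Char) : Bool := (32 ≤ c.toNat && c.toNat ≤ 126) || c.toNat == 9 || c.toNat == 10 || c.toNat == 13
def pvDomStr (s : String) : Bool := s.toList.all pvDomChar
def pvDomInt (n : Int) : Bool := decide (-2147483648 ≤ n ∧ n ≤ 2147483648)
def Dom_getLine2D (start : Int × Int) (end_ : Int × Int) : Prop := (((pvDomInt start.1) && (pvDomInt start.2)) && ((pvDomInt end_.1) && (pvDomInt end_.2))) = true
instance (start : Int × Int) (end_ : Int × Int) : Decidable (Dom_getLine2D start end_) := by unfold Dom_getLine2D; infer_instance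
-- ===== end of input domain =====

-- B replaces A's stateful Bresenham error accumulator by a closed-form y per index
-- (ceiling division), keeping the identical steep/swap setup; objective: alternative.

-- ===== PORT A =====
-- body of A's for-loop (state: points, y, error)
def pvStepA (is_steep : Bool) (dy ystep dx : Int)
    (st : List (List Int) × Int × Int) (x : Int) : List (List Int) × Int × Int :=
  let coord := if is_steep then [st.2.1, x] else [x, st.2.1]
  let points := st.1 ++ [coord]
  let error := st.2.2 - |dy|
  if error < 0 then (points, st.2.1 + ystep, error + dx) else (points, st.2.1, error)

def getLine2D (start : Int × Int) (end_ : Int × Int) : List (List Int) :=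
  let x1 := start.1
  let y1 := start.2
  let x2 := end_.1
  let y2 := end_.2
  let dx := x2 - x1
  let dy := y2 - y1
  let is_steep : Bool := decide (|dy| > |dx|)
  let (x1, y1, x2, y2) := if is_steep then (y1, x1, y2, x2) else (x1, y1, x2, y2)
  let (x1, y1, x2, y2, swapped) :=
    if x1 > x2 then (x2, y2, x1, y1, true) else (x1, y1, x2, y2, false)
  let dx := x2 - x1
  let dy := y2 - y1
  -- int(dx / 2.0): here 0 ≤ dx < 2^53, where float division then truncation equals floor division
  let error := PySem.Int.floordiv dx 2
  let ystep : Int := if y1 < y2 then 1 else -1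
  let r := (PySem.List.pyRange x1 (x2 + 1) 1).foldl (pvStepA is_steep dy ystep dx) ([], y1, error)
  if swapped then r.1.reverse else r.1

-- ===== PORT B =====
-- k = max(0, ceil((i*ady - half)/dx)) exactly as Source B computes it
def pvKB (ady half dx i : Int) : Int :=
  let k0 := -(PySem.Int.floordiv (-(i * ady - half)) dx)
  if k0 < 0 then 0 else k0

-- body of Source B's for-loop (accumulator: pts)
def pvStepB (is_steep : Bool) (y1 ystep ady half dx x1 : Int)
    (pts : List (List Int)) (i : Int) : List (List Int) :=
  let k := pvKB ady half dx i
  let y := y1 + ystep * k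
  let x := x1 + i
  pts ++ [if is_steep then [y, x] else [x, y]]

def getLine2D_alt (start : Int × Int) (end_ : Int × Int) : List (List Int) :=
  let x1 := start.1
  let y1 := start.2
  let x2 := end_.1
  let y2 := end_.2
  let is_steep : Bool := decide (|y2 - y1| > |x2 - x1|)
  let (x1, y1, x2, y2) := if is_steep then (y1, x1, y2, x2) else (x1, y1, x2, y2)
  let (x1, y1, x2, y2, swapped) :=
    if x1 > x2 then (x2, y2, x1, y1, true) else (x1, y1, x2, y2, false)
  let dx := x2 - x1
  let ady := |y2 - y1|
  let ystep : Int := if y1 < y2 then 1 else -1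
  let pts :=
    if dx == 0 then [if is_steep then [y1, x1] else [x1, y1]]
    else (PySem.List.pyRange 0 (dx + 1) 1).foldl
      (pvStepB is_steep y1 ystep ady (PySem.Int.floordiv dx 2) dx x1) []
  if swapped then pts.reverse else pts

-- ===== PRECONDITION & SPEC =====
def Spec_getLine2D (start : Int × Int) (end_ : Int × Int) (out : List (List Int)) : Prop := out = getLine2D_alt start end_
instance (start : Int × Int) (end_ : Int × Int) (out : List (List Int)) : Decidable (Spec_getLine2D start end_ out) := by unfold Spec_getLine2D; infer_instance

-- ===== CLAIM (what is proved, stated in full; the proofs are below) =====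
def Claim_equal_getLine2D : Prop := ∀ (start : Int × Int) (end_ : Int × Int), Dom_getLine2D start end_ → Spec_getLine2D start end_ (getLine2D start end_)

-- ===== LEMMAS AND PROOFS =====

-- bracket characterization of pvKB: it is the least m ≥ 0 with half - i*ady + m*dx ≥ 0
lemma pvKB_nonneg (ady half dx i : Int) : 0 ≤ pvKB ady half dx i := by
  unfold pvKB; dsimp only; split_ifs <;> omega

lemma pvKB_upper {dx : Int} (hdx : 0 < dx) (ady half i : Int) :
    i * ady - half ≤ pvKB ady half dx i * dx := by
  have h := (PySem.Int.neg_floordiv_neg_eq_iff_of_pos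
    (a := i * ady - half) (b := dx)
    (q := -PySem.Int.floordiv (-(i * ady - half)) dx) hdx).mp rfl
  unfold pvKB; dsimp only
  split_ifs with hk
  · have hneg : (-PySem.Int.floordiv (-(i * ady - half)) dx) * dx < 0 :=
      mul_neg_of_neg_of_pos hk hdx
    rw [zero_mul]
    linarith [h.2]
  · exact h.2

lemma pvKB_lower {dx : Int} (hdx : 0 < dx) (ady half i : Int) :
    pvKB ady half dx i = 0 ∨ (pvKB ady half dx i - 1) * dx < i * ady - half := by
  have h := (PySem.Int.neg_floordiv_neg_eq_iff_of_pos
    (a := i * ady - half) (b := dx)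
    (q := -PySem.Int.floordiv (-(i * ady - half)) dx) hdx).mp rfl
  unfold pvKB; dsimp only
  split_ifs with hk
  · exact Or.inl rfl
  · exact Or.inr h.1

lemma pvKB_zero {dx : Int} (hdx : 0 < dx) {half : Int} (hhalf : 0 ≤ half) (ady : Int) :
    pvKB ady half dx 0 = 0 := by
  have hub := pvKB_upper hdx ady half 0
  have hk0 := pvKB_nonneg ady half dx 0
  rcases pvKB_lower hdx ady half 0 with h | h
  · exact h
  · have h0 : (pvKB ady half dx 0 - 1) * dx < 0 * dx := by
      rw [zero_mul]; nlinarith [h]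
    have := lt_of_mul_lt_mul_right h0 (le_of_lt hdx)
    omega

-- the stateful update of A advances pvKB by exactly its branch condition
lemma pvKB_succ {dx : Int} (hdx : 0 < dx) {ady : Int} (hady : 0 ≤ ady) (hs : ady ≤ dx)
    (half n : Int) :
    pvKB ady half dx (n + 1) =
      (if half - n * ady + pvKB ady half dx n * dx - ady < 0
       then pvKB ady half dx n + 1 else pvKB ady half dx n) := by
  have hk0 : 0 ≤ pvKB ady half dx n := pvKB_nonneg ady half dx n
  have hk'0 : 0 ≤ pvKB ady half dx (n + 1) := pvKB_nonneg ady half dx (n + 1)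
  have hub : n * ady - half ≤ pvKB ady half dx n * dx := pvKB_upper hdx ady half n
  have hub' : (n + 1) * ady - half ≤ pvKB ady half dx (n + 1) * dx :=
    pvKB_upper hdx ady half (n + 1)
  have hlo := pvKB_lower hdx ady half n
  have hlo' := pvKB_lower hdx ady half (n + 1)
  generalize hgk : pvKB ady half dx n = k at *
  generalize hgk' : pvKB ady half dx (n + 1) = k' at *
  have hexp : (n + 1) * ady = n * ady + ady := by ring
  have hexp2 : (k + 1) * dx = k * dx + dx := by ring
  have hexp3 : (k' - 1) * dx = k' * dx - dx := by ring
  have hexp4 : (k - 1) * dx = k * dx - dx := by ring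
  split_ifs with hcond
  · have h1 : k < k' := by
      have hm : k * dx < k' * dx := by linarith
      exact lt_of_mul_lt_mul_right hm (le_of_lt hdx)
    have h2 : k' ≤ k + 1 := by
      rcases hlo' with h | h
      · omega
      · have hm : (k' - 1) * dx < (k + 1) * dx := by linarith
        have := lt_of_mul_lt_mul_right hm (le_of_lt hdx)
        omega
    omega
  · have h1 : k' ≤ k := by
      rcases hlo' with h | h
      · omega
      · have hm : (k' - 1) * dx < k * dx := by linarith
        have := lt_of_mul_lt_mul_right hm (le_of_lt hdx)
        omega
    have h2 : k ≤ k' := by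
      rcases hlo with h | h
      · omega
      · have hm : (k - 1) * dx < k' * dx := by linarith
        have := lt_of_mul_lt_mul_right hm (le_of_lt hdx)
        omega
    omega

-- invariant of A's loop: after n steps the state is B's closed form
lemma A_loop (steep : Bool) (s half x1 y1 dy dx : Int)
    (hdx : 0 < dx) (hs : |dy| ≤ dx) (hhalf : 0 ≤ half) :
    ∀ n : Nat,
      (PySem.List.pyRange x1 (x1 + (n : Int)) 1).foldl (pvStepA steep dy s dx) ([], y1, half)
        = ((PySem.List.pyRange 0 (n : Int) 1).map
             (fun i => if steep then [y1 + s * pvKB |dy| half dx i, x1 + i]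
                       else [x1 + i, y1 + s * pvKB |dy| half dx i]),
           y1 + s * pvKB |dy| half dx (n : Int),
           half - (n : Int) * |dy| + pvKB |dy| half dx (n : Int) * dx) := by
  have hady : 0 ≤ |dy| := abs_nonneg dy
  intro n
  induction n with
  | zero =>
      simp [PySem.List.pyRange_one_eq_nil (le_refl x1),
            PySem.List.pyRange_one_eq_nil (le_refl (0 : Int)),
            pvKB_zero hdx hhalf]
  | succ n ih =>
      have h1 : (PySem.List.pyRange x1 (x1 + ((n : Int) + 1)) 1)
          = PySem.List.pyRange x1 (x1 + (n : Int)) 1 ++ [x1 + (n : Int)] := by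
        have hr : x1 + ((n : Int) + 1) = (x1 + (n : Int)) + 1 := by ring
        rw [hr, PySem.List.pyRange_one_succ_right (by omega)]
      have h2 : (PySem.List.pyRange 0 ((n : Int) + 1) 1)
          = PySem.List.pyRange 0 (n : Int) 1 ++ [(n : Int)] := by
        rw [PySem.List.pyRange_one_succ_right (by positivity)]
      push_cast
      rw [h1, h2, List.foldl_append, ih, List.map_append]
      have hsucc := pvKB_succ hdx hady hs half (n : Int)
      simp only [List.foldl_cons, List.foldl_nil, pvStepA, List.map_cons, List.map_nil]
      by_cases hcond : half - (n : Int) * |dy| + pvKB |dy| half dx (n : Int) * dx - |dy| < 0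
      · rw [if_pos hcond, hsucc, if_pos hcond]
        simp only [Prod.mk.injEq]
        refine ⟨?_, ?_, ?_⟩ <;> first | trivial | ring
      · rw [if_neg hcond, hsucc, if_neg hcond]
        simp only [Prod.mk.injEq]
        refine ⟨?_, ?_, ?_⟩ <;> first | trivial | ring

-- B's fold is the same map
lemma B_loop (steep : Bool) (y1 s ady half dx x1 b : Int) :
    (PySem.List.pyRange 0 b 1).foldl (pvStepB steep y1 s ady half dx x1) []
      = (PySem.List.pyRange 0 b 1).map
          (fun i => if steep then [y1 + s * pvKB ady half dx i, x1 + i]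
                    else [x1 + i, y1 + s * pvKB ady half dx i]) := by
  have hfun : pvStepB steep y1 s ady half dx x1
      = fun acc i => acc ++
          [(fun i => if steep then [y1 + s * pvKB ady half dx i, x1 + i]
                     else [x1 + i, y1 + s * pvKB ady half dx i]) i] := by
    funext acc i
    simp [pvStepB]
  rw [hfun, PySem.List.foldl_append_singleton_eq_map, List.nil_append]

-- the shared core: after the steep/swap normalization, A's loop equals B's branch
lemma core (steep : Bool) (x1 y1 x2 y2 : Int) (hx : x1 ≤ x2) (hs : |y2 - y1| ≤ x2 - x1) :
    ((PySem.List.pyRange x1 (x2 + 1) 1).foldl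
        (pvStepA steep (y2 - y1) (if y1 < y2 then (1 : Int) else -1) (x2 - x1))
        ([], y1, PySem.Int.floordiv (x2 - x1) 2)).1
      = (if (x2 - x1) == 0 then [if steep then [y1, x1] else [x1, y1]]
         else (PySem.List.pyRange 0 ((x2 - x1) + 1) 1).foldl
           (pvStepB steep y1 (if y1 < y2 then (1 : Int) else -1) |y2 - y1|
             (PySem.Int.floordiv (x2 - x1) 2) (x2 - x1) x1) []) := by
  by_cases h0 : x2 - x1 = 0
  · obtain rfl : x2 = x1 := by omega
    rw [if_pos (show ((x2 - x2 == 0) = true) from by simp)]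
    simp only [PySem.List.pyRange_one_singleton, List.foldl_cons, List.foldl_nil, pvStepA]
    split <;> rfl
  · have hdx : 0 < x2 - x1 := by omega
    have hhalf : 0 ≤ PySem.Int.floordiv (x2 - x1) 2 := by
      rw [PySem.Int.floordiv_eq_ediv_of_pos (by omega)]
      exact Int.ediv_nonneg (by omega) (by omega)
    rw [if_neg (show ¬((x2 - x1 == 0) = true) by simpa using h0), B_loop]
    have hn : x2 + 1 = x1 + (((x2 - x1 + 1).toNat : Int)) := by omega
    have hn2 : ((x2 - x1 + 1).toNat : Int) = x2 - x1 + 1 := by omega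
    rw [hn, A_loop steep _ _ x1 y1 (y2 - y1) (x2 - x1) hdx hs hhalf (x2 - x1 + 1).toNat,
        hn2]

-- ===== VERDICT (by name: the statement is the Claim_ definition above) =====
theorem getLine2D_spec : Claim_equal_getLine2D := by
  intro start end_ _
  unfold Spec_getLine2D getLine2D getLine2D_alt
  obtain ⟨sx, sy⟩ := start
  obtain ⟨ex, ey⟩ := end_
  dsimp only
  by_cases hst : |ey - sy| > |ex - sx|
  · by_cases hsw : sy > ey
    · have hs1 : |sx - ex| ≤ sy - ey := by
        have e1 : |sx - ex| = |ex - sx| := abs_sub_comm _ _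
        have e2 : |ey - sy| = -(ey - sy) := abs_of_neg (by omega)
        linarith
      have h := core true ey ex sy sx (by omega) hs1
      simp only [hst, decide_true, if_true, if_pos hsw, h]
    · have hs1 : |ex - sx| ≤ ey - sy := by
        have e2 : |ey - sy| = ey - sy := abs_of_nonneg (by omega)
        linarith
      have h := core true sy sx ey ex (by omega) hs1
      simp only [hst, decide_true, if_true, if_neg hsw, h]
  · by_cases hsw : sx > ex
    · have hs1 : |sy - ey| ≤ sx - ex := by
        have e1 : |sy - ey| = |ey - sy| := abs_sub_comm _ _
        have e2 : |ex - sx| = -(ex - sx) := abs_of_neg (by omega)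
        linarith
      have h := core false ex ey sx sy (by omega) hs1
      simp only [hst, decide_false, Bool.false_eq_true, if_false, if_pos hsw, h]
    · have hs1 : |ey - sy| ≤ ex - sx := by
        have e2 : |ex - sx| = ex - sx := abs_of_nonneg (by omega)
        linarith
      have h := core false sx sy ex ey (by omega) hs1
      simp only [hst, decide_false, Bool.false_eq_true, if_false, if_neg hsw, h]
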